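-- pv_equiv track=rewrite | github.com/VectorInstitute/Newsmediabias-plus | code/NER/ner_annotation_module.py | aggregate_annotations_multi_label
-- ===== SOURCE A (Python) =====
-- def aggregate_annotations_multi_label(annotations_list):
--     """
--     Aggregate multiple lists of NER annotations into a single list.
--     Args:
--         annotations_list (list of list): A list containing multiple lists of NER annotations.
--     Returns:
--         list: A single list containing aggregated NER annotations.
--     """
--     # Find the maximum length among all annotation lists
--     max_len = max(len(annotations) for annotations in annotations_list)
--
--     # Initialize the merged_annotations list with 'O' for the maximum length
--     merged_annotations = [['O'] for _ in range(max_len)]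
--
--     # Iterate over each annotation list
--     for entity_annotations in annotations_list:
--         for i in range(len(entity_annotations)):
--             if entity_annotations[i] != 'O':
--                 if merged_annotations[i] == ['O']:
--                     merged_annotations[i] = [entity_annotations[i]]
--                 else:
--                     merged_annotations[i].append(entity_annotations[i])
--
--     return merged_annotations
-- ===== SOURCE B (Python) =====
-- def aggregate_annotations_multi_label(annotations_list):
--     max_len = max(len(a) for a in annotations_list)
--     merged_annotations = []
--     for i in range(max_len):
--         col = [a[i] for a in annotations_list if i < len(a) and a[i] != 'O']
--         merged_annotations.append(col if col else ['O'])
--     return merged_annotations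
-- ===== Notes on version B (the rewrite author's own statement) =====
-- stated objective: simpler
-- what changed: Builds the result column-by-column (positions outer, lists inner), gathering each position's non-'O' labels in one comprehension, instead of A's list-outer nesting that mutates a preinitialised table with a first-vs-later ['O'] branch.
import Mathlib
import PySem

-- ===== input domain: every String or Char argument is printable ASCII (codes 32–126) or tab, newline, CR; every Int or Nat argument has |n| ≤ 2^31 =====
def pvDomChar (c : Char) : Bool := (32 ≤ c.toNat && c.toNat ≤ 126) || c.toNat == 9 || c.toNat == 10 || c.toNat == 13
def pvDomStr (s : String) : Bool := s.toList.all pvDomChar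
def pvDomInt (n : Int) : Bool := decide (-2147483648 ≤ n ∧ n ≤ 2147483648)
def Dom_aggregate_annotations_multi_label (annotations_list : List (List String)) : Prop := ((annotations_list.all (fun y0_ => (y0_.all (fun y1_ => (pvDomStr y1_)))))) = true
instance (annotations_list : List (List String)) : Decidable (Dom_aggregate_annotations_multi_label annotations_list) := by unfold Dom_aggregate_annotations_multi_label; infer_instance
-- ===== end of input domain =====

-- B builds the merged annotations column-by-column (positions outer, lists inner) instead of
-- A's list-outer mutation of a preinitialised table; objective: simpler decomposition, same cost.


-- ===== PORT A =====
-- body of A's inner loop at index i (i ranges over range(len a), so a[i]? is always some;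
-- the none fallbacks are totalization guards that are never taken)
def pvStepA (a : List String) (i : Nat) (m : List (List String)) : List (List String) :=
  match a[i]? with
  | none => m
  | some v =>
    if v = "O" then m
    else
      match m[i]? with
      | none => m
      | some cur => if cur = ["O"] then m.set i [v] else m.set i (cur ++ [v])

def aggregate_annotations_multi_label (annotations_list : List (List String)) : List (List String) :=
  match PySem.List.max? (annotations_list.map (fun a => a.length)) (fun x => x) with
  | none => []  -- Python: max() raises ValueError here (annotations_list = []); excluded by Pre_
  | some max_len =>
    annotations_list.foldl
      (fun merged entity_annotations =>
        (List.range entity_annotations.length).foldl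
          (fun m i => pvStepA entity_annotations i m) merged)
      (List.replicate max_len ["O"])

-- ===== PORT B =====
-- col = [a[i] for a in annotations_list if i < len(a) and a[i] != 'O']
def pvPick (i : Nat) (a : List String) : Option String :=
  match a[i]? with
  | some v => if v ≠ "O" then some v else none
  | none => none

def pvColB (annotations_list : List (List String)) (i : Nat) : List String :=
  annotations_list.filterMap (pvPick i)

def aggregate_annotations_multi_label_alt (annotations_list : List (List String)) : List (List String) :=
  match PySem.List.max? (annotations_list.map (fun a => a.length)) (fun x => x) with
  | none => []  -- Python: max() raises ValueError here (annotations_list = []); excluded by Pre_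
  | some max_len =>
    (List.range max_len).map (fun i =>
      let col := pvColB annotations_list i
      if col = [] then ["O"] else col)

-- ===== PRECONDITION & SPEC =====
-- Pre_ excludes only annotations_list = [], on which Python A (and B) raise ValueError in max().
def Pre_aggregate_annotations_multi_label (annotations_list : List (List String)) : Prop :=
  annotations_list ≠ []
instance (annotations_list : List (List String)) : Decidable (Pre_aggregate_annotations_multi_label annotations_list) := by unfold Pre_aggregate_annotations_multi_label; infer_instance

def pvWitness_aggregate_annotations_multi_label : List (List String) :=
  [["O", "B-PER", "O"], ["B-LOC", "I-PER"]]

def Spec_aggregate_annotations_multi_label (annotations_list : List (List String)) (out : List (List String)) : Prop := out = aggregate_annotations_multi_label_alt annotations_list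
instance (annotations_list : List (List String)) (out : List (List String)) : Decidable (Spec_aggregate_annotations_multi_label annotations_list out) := by unfold Spec_aggregate_annotations_multi_label; infer_instance

-- ===== CLAIM (what is proved, stated in full; the proofs are below) =====
def Claim_equal_aggregate_annotations_multi_label : Prop := ∀ (annotations_list : List (List String)), Dom_aggregate_annotations_multi_label annotations_list → Pre_aggregate_annotations_multi_label annotations_list → Spec_aggregate_annotations_multi_label annotations_list (aggregate_annotations_multi_label annotations_list)

-- ===== LEMMAS AND PROOFS =====

-- what A's inner-loop body does to the cell at index i, expressed on the optional cell value
def pvBodyVal (a : List String) (i : Nat) (o : Option (List String)) : Option (List String) :=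
  match a[i]? with
  | none => o
  | some v =>
    if v = "O" then o
    else
      match o with
      | none => none
      | some cur => some (if cur = ["O"] then [v] else cur ++ [v])

theorem pvStepA_get (a : List String) (i : Nat) (m : List (List String)) (j : Nat) :
    (pvStepA a i m)[j]? = if j = i then pvBodyVal a i m[i]? else m[j]? := by
  by_cases hj : j = i
  · subst hj
    rw [if_pos rfl]
    rcases ha : a[j]? with _ | v
    · simp [pvStepA, pvBodyVal, ha]
    · by_cases hv : v = "O"
      · simp [pvStepA, pvBodyVal, ha, hv]
      · rcases hm : m[j]? with _ | cur
        · simp [pvStepA, pvBodyVal, ha, hv, hm]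
        · have hij : j < m.length := (List.getElem?_eq_some_iff.mp hm).1
          have hget : m[j] = cur := (List.getElem?_eq_some_iff.mp hm).2
          by_cases hc : cur = ["O"] <;>
            simp [pvStepA, pvBodyVal, ha, hv, hc, hget, hij]
  · rw [if_neg hj]
    rcases ha : a[i]? with _ | v
    · simp [pvStepA, ha]
    · by_cases hv : v = "O"
      · simp [pvStepA, ha, hv]
      · rcases hm : m[i]? with _ | cur
        · simp [pvStepA, ha, hv, hm]
        · by_cases hc : cur = ["O"] <;>
            simp [pvStepA, ha, hv, hm, hc, Ne.symm hj]

theorem pvInner_get (a : List String) (n : Nat) (m : List (List String)) (j : Nat) :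
    ((List.range n).foldl (fun m i => pvStepA a i m) m)[j]? =
      if j < n then pvBodyVal a j m[j]? else m[j]? := by
  induction n generalizing j with
  | zero => simp
  | succ n ih =>
    rw [List.range_succ, List.foldl_append]
    simp only [List.foldl_cons, List.foldl_nil]
    rw [pvStepA_get]
    by_cases hj : j = n
    · subst hj
      rw [if_pos rfl, ih, if_neg (by omega), if_pos (by omega)]
    · rw [if_neg hj, ih]
      by_cases h1 : j < n
      · rw [if_pos h1, if_pos (by omega)]
      · rw [if_neg h1, if_neg (by omega)]

theorem pvInner_get' (a : List String) (m : List (List String)) (j : Nat) :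
    ((List.range a.length).foldl (fun m i => pvStepA a i m) m)[j]? = pvBodyVal a j m[j]? := by
  rw [pvInner_get]
  by_cases h : j < a.length
  · rw [if_pos h]
  · rw [if_neg h]
    unfold pvBodyVal
    rw [List.getElem?_eq_none (by omega : a.length ≤ j)]

theorem pvOuter_get (xs : List (List String)) (m : List (List String)) (j : Nat) :
    (xs.foldl (fun merged a => (List.range a.length).foldl (fun m i => pvStepA a i m) merged) m)[j]? =
      xs.foldl (fun o a => pvBodyVal a j o) m[j]? := by
  induction xs generalizing m with
  | nil => rfl
  | cons a t ih => simp only [List.foldl_cons]; rw [ih, pvInner_get']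

theorem pvBodyVal_none (a : List String) (j : Nat) : pvBodyVal a j none = none := by
  unfold pvBodyVal
  rcases a[j]? with _ | v
  · rfl
  · by_cases hv : v = "O" <;> simp [hv]

theorem pvFold_none (xs : List (List String)) (j : Nat) :
    xs.foldl (fun o a => pvBodyVal a j o) none = none := by
  induction xs with
  | nil => rfl
  | cons a t ih => simp only [List.foldl_cons, pvBodyVal_none, ih]

theorem pvColFold (j : Nat) (xs : List (List String)) (c : List String) (hc : "O" ∉ c) :
    xs.foldl (fun o a => pvBodyVal a j o) (some (if c = [] then ["O"] else c)) =
      some (if c ++ pvColB xs j = [] then ["O"] else c ++ pvColB xs j) := by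
  induction xs generalizing c with
  | nil => simp [pvColB]
  | cons a t ih =>
    simp only [List.foldl_cons]
    rcases ha : a[j]? with _ | v
    · have h1 : pvBodyVal a j (some (if c = [] then ["O"] else c)) =
          some (if c = [] then ["O"] else c) := by simp [pvBodyVal, ha]
      have h2 : pvColB (a :: t) j = pvColB t j := by
        simp [pvColB, pvPick, ha]
      rw [h1, h2, ih c hc]
    · by_cases hv : v = "O"
      · have h1 : pvBodyVal a j (some (if c = [] then ["O"] else c)) =
            some (if c = [] then ["O"] else c) := by simp [pvBodyVal, ha, hv]
        have h2 : pvColB (a :: t) j = pvColB t j := by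
          simp [pvColB, pvPick, ha, hv]
        rw [h1, h2, ih c hc]
      · have h1 : pvBodyVal a j (some (if c = [] then ["O"] else c)) =
            some (if c ++ [v] = [] then ["O"] else c ++ [v]) := by
          by_cases hce : c = []
          · simp [pvBodyVal, ha, hv, hce]
          · have hcO : c ≠ ["O"] := fun h => hc (by simp [h])
            simp [pvBodyVal, ha, hv, hce, hcO]
        have h2 : pvColB (a :: t) j = v :: pvColB t j := by
          simp [pvColB, pvPick, ha, hv]
        have hO : "O" ∉ c ++ [v] := by
          simp only [List.mem_append, List.mem_singleton]
          rintro (h | h)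
          · exact hc h
          · exact hv h.symm
        rw [h1, ih (c ++ [v]) hO, h2]
        have : (c ++ [v]) ++ pvColB t j = c ++ (v :: pvColB t j) := by
          rw [List.append_assoc]; rfl
        rw [this]

theorem pvA_eq_B (xs : List (List String)) :
    aggregate_annotations_multi_label xs = aggregate_annotations_multi_label_alt xs := by
  unfold aggregate_annotations_multi_label aggregate_annotations_multi_label_alt
  rcases hmax : PySem.List.max? (xs.map (fun a => a.length)) (fun x => x) with _ | M
  · rw [hmax]
  · rw [hmax]
    apply List.ext_getElem?
    intro j
    rw [pvOuter_get]
    by_cases hj : j < M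
    · have hinit : (List.replicate M (["O"] : List String))[j]? = some ["O"] := by
        simp [hj]
      rw [hinit]
      have h := pvColFold j xs [] (by simp)
      rw [if_pos rfl] at h
      simp only [List.nil_append] at h
      rw [h]
      simp [hj]
    · rw [List.getElem?_eq_none (by simpa using (by omega : M ≤ j)),
        List.getElem?_eq_none (by simp; omega)]
      exact pvFold_none xs j

-- ===== VERDICT (by name: the statement is the Claim_ definition above) =====
theorem aggregate_annotations_multi_label_spec : Claim_equal_aggregate_annotations_multi_label := by
  intro xs _ _
  exact pvA_eq_B xs
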